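-- pv_equiv track=rewrite | github.com/PythonIsMagic/eular_python | src/eular_018.py | move_path
-- ===== SOURCE A (Python) =====
-- def move_path(path, row):
--     """ Moves to the next path in a tree. """
--     # Base case: If the row is 0, we can't move that one since its the top.
--     # Should mean iteration is over.
--     if row == 0:
--         return False
--     elif path[row] == path[row - 1]:
--         path[row] += 1
--
--         # Make sure all sub rows match! To avoid skips
--         for x in range(row + 1, len(path)):
--             path[x] = path[row]
--
--         return True
--     else:
--         return move_path(path, row - 1)
-- ===== SOURCE B (Python) =====
-- def move_path(path, row):
--     """ Moves to the next path in a tree. """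
--     # Find the deepest row r <= row whose value equals its parent's row value;
--     # then bump it and rewrite the whole tail below it in one slice assignment.
--     r = next((x for x in range(row, 0, -1) if path[x] == path[x - 1]), 0)
--     if r == 0:
--         return False
--     path[r] += 1
--     path[r + 1:] = [path[r]] * (len(path) - r - 1)
--     return True
-- ===== Notes on version B (the rewrite author's own statement) =====
-- stated objective: idiomatic
-- what changed: Replaces A's tail recursion that re-tests one row per call with a single search expression (next over a countdown range) that locates the row to bump, followed by one in-place bump and a slice assignment rewriting the tail, instead of a per-element write loop.
-- outside the precondition, e.g. on move_path([5, 5], -1): A returns True, B returns False; on move_path([1, 2], 5): A raises IndexError, B raises IndexError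
import Mathlib
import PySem

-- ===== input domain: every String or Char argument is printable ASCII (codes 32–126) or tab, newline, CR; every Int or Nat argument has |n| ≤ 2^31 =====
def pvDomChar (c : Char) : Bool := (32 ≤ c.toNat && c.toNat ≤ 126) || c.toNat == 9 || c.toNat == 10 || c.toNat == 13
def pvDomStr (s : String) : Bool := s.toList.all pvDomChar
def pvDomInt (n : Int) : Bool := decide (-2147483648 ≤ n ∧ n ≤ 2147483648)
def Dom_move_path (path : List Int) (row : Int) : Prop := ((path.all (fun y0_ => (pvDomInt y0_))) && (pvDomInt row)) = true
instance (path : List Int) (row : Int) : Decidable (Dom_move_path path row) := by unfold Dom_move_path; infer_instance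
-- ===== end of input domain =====

-- ===== PORT A =====
-- A mutates `path` in place; only the RETURN value is claimed equivalent here.
-- Tail recursion on `row`; recursion is carried out on row.toNat.
-- For row < 0 Python A uses negative-index wraparound / raises IndexError: excluded by Pre_.
def move_path_go (path : List Int) : Nat → Bool
  | 0 => false
  | r + 1 =>
    if PySem.List.pyGet? path ((r : Int) + 1) = PySem.List.pyGet? path (r : Int) then true
    else move_path_go path r

def move_path (path : List Int) (row : Int) : Bool :=
  if row ≤ 0 then false else move_path_go path row.toNat

-- ===== PORT B =====
-- B: find the first x in range(row, 0, -1) with path[x] == path[x-1] (`next` over a generator);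
-- the subsequent bump and slice assignment only mutate `path`, so the result is whether one was found.
def move_path_alt (path : List Int) (row : Int) : Bool :=
  match (PySem.List.pyRange row 0 (-1)).find?
      (fun x => decide (PySem.List.pyGet? path x = PySem.List.pyGet? path (x - 1))) with
  | some _ => true
  | none => false

-- ===== PRECONDITION & SPEC =====
-- Pre_ restricts to the function's natural domain: row = 0, or a valid row index 0 < row < len(path).
-- Outside it (negative row) A either raises IndexError or returns via accidental negative-index
-- wraparound, and for row >= len(path) both programs raise IndexError.
def Pre_move_path (path : List Int) (row : Int) : Prop :=
  row = 0 ∨ (0 < row ∧ row < path.length)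
instance (path : List Int) (row : Int) : Decidable (Pre_move_path path row) := by
  unfold Pre_move_path; infer_instance
def pvWitness_move_path : List Int × Int := ([0, 0, 1], 2)

def Spec_move_path (path : List Int) (row : Int) (out : Bool) : Prop := out = move_path_alt path row
instance (path : List Int) (row : Int) (out : Bool) : Decidable (Spec_move_path path row out) := by unfold Spec_move_path; infer_instance

-- ===== CLAIM (what is proved, stated in full; the proofs are below) =====
def Claim_equal_move_path : Prop := ∀ (path : List Int) (row : Int), Dom_move_path path row → Pre_move_path path row → Spec_move_path path row (move_path path row)

-- ===== LEMMAS AND PROOFS =====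

theorem move_path_go_eq_find (path : List Int) (n : Nat) :
    move_path_go path n =
      ((PySem.List.pyRange (n : Int) 0 (-1)).find?
        (fun x => decide (PySem.List.pyGet? path x = PySem.List.pyGet? path (x - 1)))).isSome := by
  induction n with
  | zero =>
    rw [PySem.List.pyRange_neg_one_eq_nil (by norm_num)]
    simp [move_path_go]
  | succ r ih =>
    rw [PySem.List.pyRange_neg_one_cons (by positivity : (0 : Int) < ((r + 1 : Nat) : Int))]
    push_cast [List.find?_cons, show ((r : Int) + 1 - 1) = (r : Int) from by ring]
    cases hd : decide (PySem.List.pyGet? path ((r : Int) + 1) = path[r]?) <;>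
      simp [move_path_go, hd, ih]

-- ===== VERDICT (by name: the statement is the Claim_ definition above) =====
theorem move_path_spec : Claim_equal_move_path := by
  intro path row _ _
  unfold Spec_move_path move_path move_path_alt
  by_cases hle : row ≤ 0
  · rw [PySem.List.pyRange_neg_one_eq_nil hle]
    simp [hle]
  · have h0 : (0 : Int) ≤ row := le_of_not_ge hle
    have hcast : ((row.toNat : Int)) = row := Int.toNat_of_nonneg h0
    rw [if_neg hle, move_path_go_eq_find, hcast]
    cases hfind : (PySem.List.pyRange row 0 (-1)).find?
        (fun x => decide (PySem.List.pyGet? path x = PySem.List.pyGet? path (x - 1))) <;>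
      simp
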